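-- pv_equiv track=rewrite | github.com/canstralian/CodeCraftLab | data_utils.py | split_python_file
-- ===== SOURCE A (Python) =====
-- def split_python_file(content):
--     """
--     Split a Python file content into separate code examples.
--
--     Args:
--         content: String content of Python file
--
--     Returns:
--         list: List of code examples
--     """
--     examples = []
--
--     # Simple splitting by function or class definitions
--     lines = content.split("\n")
--     current_example = []
--
--     for line in lines:
--         if (line.startswith("def ") or line.startswith("class ")) and current_example:
--             # Start of a new function/class, save the previous one
--             examples.append("\n".join(current_example))
--             current_example = [line]
--         else:
--             current_example.append(line)
--
--     # Add the last example
--     if current_example: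
--         examples.append("\n".join(current_example))
--
--     # If no examples were extracted, use the whole file as one example
--     if not examples:
--         examples = [content]
--
--     return [{"code": example} for example in examples]
-- ===== SOURCE B (Python) =====
-- def _is_def_or_class(line):
--     return line.startswith("def ") or line.startswith("class ")
--
-- def _chunks(first, rest):
--     """Chunks of [first]+rest, cutting right before each def/class line of rest."""
--     i = 0
--     while i < len(rest) and not _is_def_or_class(rest[i]):
--         i += 1
--     chunk = "\n".join([first] + rest[:i])
--     if i == len(rest):
--         return [chunk]
--     return [chunk] + _chunks(rest[i], rest[i + 1:])
--
-- def split_python_file(content):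
--     lines = content.split("\n")
--     return [{"code": c} for c in _chunks(lines[0], lines[1:])]
-- ===== Notes on version B (the rewrite author's own statement) =====
-- stated objective: simpler
-- what changed: Replaces A's single-pass state machine (mutable current-buffer flushed on each boundary line, plus two dead fallback guards) by a recursive scan-to-next-boundary splitter that slices whole chunks at once; the first-line exemption falls out of recursing on lines[1:], and the unreachable empty-examples fallback disappears.
import Mathlib
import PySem

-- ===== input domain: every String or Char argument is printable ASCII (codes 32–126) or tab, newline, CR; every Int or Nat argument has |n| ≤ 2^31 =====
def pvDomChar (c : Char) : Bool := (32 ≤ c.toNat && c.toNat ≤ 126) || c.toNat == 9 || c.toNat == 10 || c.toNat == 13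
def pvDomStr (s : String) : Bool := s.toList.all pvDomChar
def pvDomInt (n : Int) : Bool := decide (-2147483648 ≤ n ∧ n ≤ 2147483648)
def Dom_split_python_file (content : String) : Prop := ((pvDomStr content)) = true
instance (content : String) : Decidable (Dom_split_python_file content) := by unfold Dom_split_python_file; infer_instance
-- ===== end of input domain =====

-- B replaces A's per-line buffer/flush state machine by a recursive scan-to-next-boundary
-- splitter that slices whole chunks at once (objective: simpler; return values proved equal).


-- ===== PORT A =====
-- one step of A's for-loop; state = (examples, current_example)
def pvStepA (st : List String × List String) (line : String) : List String × List String :=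
  if (PySem.Str.startswith line "def " || PySem.Str.startswith line "class ") && !st.2.isEmpty then
    (st.1 ++ [PySem.Str.join "\n" st.2], [line])
  else
    (st.1, st.2 ++ [line])

def split_python_file (content : String) : List (List (String × String)) :=
  -- content.split("\n"): "\n" ≠ "" so split? is always `some`; getD [] is exact
  let lines := (PySem.Str.split? content "\n").getD []
  let st := lines.foldl pvStepA ([], [])
  let examples := if st.2.isEmpty then st.1 else st.1 ++ [PySem.Str.join "\n" st.2]
  let examples := if examples.isEmpty then [content] else examples
  examples.map (fun e => [("code", e)])

-- ===== PORT B =====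
def pvIsDefOrClass (line : String) : Bool :=
  PySem.Str.startswith line "def " || PySem.Str.startswith line "class "

-- the index `i` computed by B's inner while loop: distance to the next boundary line
def pvScanLen (rest : List String) : Nat :=
  match rest with
  | [] => 0
  | l :: ls => if pvIsDefOrClass l then 0 else pvScanLen ls + 1

def pvChunks (first : String) (rest : List String) : List String :=
  let i := pvScanLen rest
  let chunk := PySem.Str.join "\n" (first :: rest.take i)
  -- `if i == len(rest) … else recurse on rest[i], rest[i+1:]`: rest[i:] = b :: tl
  match h : rest.drop i with
  | [] => [chunk]
  | b :: tl => chunk :: pvChunks b tl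
termination_by rest.length
decreasing_by
  have hle : (rest.drop i).length ≤ rest.length := by
    simpa using List.length_drop_le (l := rest) (i := i)
  rw [h] at hle
  simpa using Nat.lt_of_lt_of_le (Nat.lt_succ_self tl.length) hle

def split_python_file_alt (content : String) : List (List (String × String)) :=
  match (PySem.Str.split? content "\n").getD [] with
  | [] => []  -- unreachable: split always returns at least one piece
  | l :: ls => (pvChunks l ls).map (fun c => [("code", c)])

-- ===== PRECONDITION & SPEC =====
def Spec_split_python_file (content : String) (out : List (List (String × String))) : Prop := out = split_python_file_alt content
instance (content : String) (out : List (List (String × String))) : Decidable (Spec_split_python_file content out) := by unfold Spec_split_python_file; infer_instance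

-- ===== CLAIM (what is proved, stated in full; the proofs are below) =====
def Claim_equal_split_python_file : Prop := ∀ (content : String), Dom_split_python_file content → Spec_split_python_file content (split_python_file content)

-- ===== LEMMAS AND PROOFS =====

-- common recursive characterisation both ports are reduced to
def pvRec (cur : List String) : List String → List String
  | [] => [PySem.Str.join "\n" cur]
  | l :: ls =>
      if pvIsDefOrClass l then PySem.Str.join "\n" cur :: pvRec [l] ls
      else pvRec (cur ++ [l]) ls

-- A's loop, run from a nonempty buffer, followed by the final flush, computes pvRec
theorem pvLoopA_eq (ls : List String) : ∀ (exs cur : List String), cur ≠ [] →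
    (let st := ls.foldl pvStepA (exs, cur);
     if st.2.isEmpty then st.1 else st.1 ++ [PySem.Str.join "\n" st.2]) = exs ++ pvRec cur ls := by
  induction ls with
  | nil =>
      intro exs cur hcur
      simp [pvRec, List.isEmpty_iff, hcur]
  | cons l ls ih =>
      intro exs cur hcur
      have hcur' : cur.isEmpty = false := by
        rw [List.isEmpty_eq_false_iff]; exact hcur
      by_cases hb : (PySem.Str.startswith l "def " || PySem.Str.startswith l "class ") = true
      · have hstep : pvStepA (exs, cur) l = (exs ++ [PySem.Str.join "\n" cur], [l]) := by
          rw [pvStepA, hb, hcur']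
          rfl
        have hrec : pvRec cur (l :: ls) = PySem.Str.join "\n" cur :: pvRec [l] ls := by
          rw [pvRec, pvIsDefOrClass, hb]
          rfl
        rw [List.foldl_cons, hstep, ih _ [l] (by simp), hrec]
        simp
      · rw [Bool.not_eq_true] at hb
        have hstep : pvStepA (exs, cur) l = (exs, cur ++ [l]) := by
          rw [pvStepA, hb]
          rfl
        have hrec : pvRec cur (l :: ls) = pvRec (cur ++ [l]) ls := by
          rw [pvRec, pvIsDefOrClass, hb]
          rfl
        rw [List.foldl_cons, hstep, ih exs (cur ++ [l]) (by simp), hrec]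

-- non-dependent unfolding of pvChunks
theorem pvChunks_unfold (first : String) (rest : List String) : pvChunks first rest =
    PySem.Str.join "\n" (first :: rest.take (pvScanLen rest)) ::
      (match rest.drop (pvScanLen rest) with
       | [] => []
       | b :: tl => pvChunks b tl) := by
  rw [pvChunks]
  split <;> rename_i hd <;> rw [hd]

-- B's chunker computes pvRec (generalised over the part of the chunk already scanned)
theorem pvRec_eq (rest : List String) : ∀ (cur : List String), cur ≠ [] →
    pvRec cur rest =
      PySem.Str.join "\n" (cur ++ rest.take (pvScanLen rest)) ::
        (match rest.drop (pvScanLen rest) with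
         | [] => []
         | b :: tl => pvChunks b tl) := by
  induction rest with
  | nil => intro cur hcur; simp [pvRec, pvScanLen]
  | cons l ls ih =>
      intro cur hcur
      by_cases hb : pvIsDefOrClass l = true
      · have hls := ih [l] (by simp)
        simp only [pvRec, hb, if_pos, pvScanLen, List.take_zero, List.append_nil, List.drop_zero]
        rw [hls, pvChunks_unfold]
        rw [List.singleton_append]
      · simp only [pvRec, hb, Bool.false_eq_true, if_neg, not_false_iff, pvScanLen,
          List.take_succ_cons, List.drop_succ_cons]
        rw [ih (cur ++ [l]) (by simp)]
        simp

theorem pvChunks_eq_pvRec (first : String) (rest : List String) :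
    pvChunks first rest = pvRec [first] rest := by
  rw [pvChunks_unfold, pvRec_eq rest [first] (by simp)]
  simp

-- content.split("\n") is never the empty list
theorem pvSplitOn_go_ne_nil (sep : List Char) (fuel : Nat) : ∀ (l cur : List Char) (acc : List (List Char)),
    PySem.Chars.splitOn.go sep fuel l cur acc ≠ [] := by
  induction fuel with
  | zero => intro l cur acc; simp [PySem.Chars.splitOn.go]
  | succ fuel ih =>
      intro l cur acc
      cases l with
      | nil => simp [PySem.Chars.splitOn.go]
      | cons c rest =>
          rw [PySem.Chars.splitOn.go]
          split
          · exact ih _ _ _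
          · exact ih _ _ _

theorem pvSplit_ne_nil (content : String) :
    (PySem.Str.split? content "\n").getD [] ≠ [] := by
  simp only [PySem.Str.split?, PySem.Chars.split?, PySem.Chars.splitOn]
  rw [if_neg (by decide : ¬("\n".toList.isEmpty = true))]
  simp only [Option.map_some, Option.getD_some, ne_eq, List.map_eq_nil_iff]
  exact pvSplitOn_go_ne_nil _ _ _ _ _

-- ===== VERDICT (by name: the statement is the Claim_ definition above) =====
theorem split_python_file_spec : Claim_equal_split_python_file := by
  intro content _
  unfold Spec_split_python_file split_python_file split_python_file_alt
  cases hl : (PySem.Str.split? content "\n").getD [] with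
  | nil => exact absurd hl (pvSplit_ne_nil content)
  | cons l ls =>
      simp only [List.foldl_cons]
      have hfirst : pvStepA ([], []) l = ([], [l]) := by
        simp [pvStepA]
      rw [hfirst]
      have hloop := pvLoopA_eq ls [] [l] (by simp)
      simp only at hloop
      rw [hloop]
      have hne : pvRec [l] ls ≠ [] := by
        rw [pvRec_eq ls [l] (by simp)]; simp
      rw [pvChunks_eq_pvRec]
      simp [List.isEmpty_iff, hne]
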